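-- pv_equiv track=rewrite | github.com/nicperval/LAB-Extranjeria | src/extranjeria.py | pais_mas_representado_por_distrito
-- ===== SOURCE A (Python) =====
-- from collections import defaultdict
--
-- def pais_mas_representado_por_distrito(registros):
--     distritos_paises = defaultdict(lambda: defaultdict(int))
--     for distrito, seccion, barrio, pais, hombres, mujeres in registros:
--         total_personas = hombres + mujeres
--         distritos_paises[distrito][pais] += total_personas
--     pais_maximo_por_distrito = {}
--     for distrito, paises in distritos_paises.items():
--         pais_maximo = max(paises, key=paises.get)
--         pais_maximo_por_distrito[distrito] = pais_maximo
--     return pais_maximo_por_distrito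
-- ===== SOURCE B (Python) =====
-- def pais_mas_representado_por_distrito(registros):
--     totales = {}
--     for distrito, seccion, barrio, pais, hombres, mujeres in registros:
--         clave = (distrito, pais)
--         totales[clave] = totales.get(clave, 0) + hombres + mujeres
--     # Stable descending sort by total; the first entry seen for each district is
--     # its maximum (first-inserted among ties, matching A's tie-break).
--     mejor = {}
--     for (distrito, pais), total in sorted(totales.items(), key=lambda kv: kv[1], reverse=True):
--         mejor.setdefault(distrito, pais)
--     # Rebuild the result in district first-appearance order.
--     return {distrito: mejor[distrito] for distrito, _, _, _, _, _ in registros}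
-- ===== Notes on version B (the rewrite author's own statement) =====
-- stated objective: alternative
-- what changed: Replaces A's nested per-district dict plus a max() call per district with a sort-then-scan selection: one flat totals dict keyed by (distrito, pais), a single stable sort of all entries descending by total, one setdefault pass taking the first (= maximal, first-inserted among ties) country per district, and a final comprehension restoring district first-appearance order.
import Mathlib
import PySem

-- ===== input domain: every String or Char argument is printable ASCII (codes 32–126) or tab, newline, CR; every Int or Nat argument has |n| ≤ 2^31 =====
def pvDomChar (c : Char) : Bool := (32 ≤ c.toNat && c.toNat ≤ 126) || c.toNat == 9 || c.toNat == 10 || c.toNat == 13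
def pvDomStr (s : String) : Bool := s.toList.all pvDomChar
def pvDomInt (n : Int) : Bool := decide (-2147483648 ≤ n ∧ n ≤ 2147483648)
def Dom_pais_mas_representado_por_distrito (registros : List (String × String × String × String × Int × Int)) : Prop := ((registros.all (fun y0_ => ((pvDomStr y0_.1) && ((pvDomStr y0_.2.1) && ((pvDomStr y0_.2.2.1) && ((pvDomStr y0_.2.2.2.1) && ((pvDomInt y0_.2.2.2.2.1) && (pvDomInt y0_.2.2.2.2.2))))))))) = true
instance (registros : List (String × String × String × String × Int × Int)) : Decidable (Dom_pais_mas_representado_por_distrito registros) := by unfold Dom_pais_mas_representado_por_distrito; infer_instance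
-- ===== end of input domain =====

-- B replaces A's nested per-district dict + per-district max() with a sort-then-scan selection:
-- flat totals keyed by (distrito, pais), one stable descending sort by total, one setdefault pass
-- taking the first country seen per district, and a final rebuild in district first-appearance order.

-- ===== PORT A =====
def pais_mas_representado_por_distrito (registros : List (String × String × String × String × Int × Int)) : List (String × String) :=
  let distritos_paises : PySem.Dict String (PySem.Dict String Int) :=
    registros.foldl
      (fun d r =>
        d.modify r.1 PySem.Dict.empty
          (fun inner => inner.modify r.2.2.2.1 0 (fun t => t + (r.2.2.2.2.1 + r.2.2.2.2.2))))
      PySem.Dict.empty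
  let pais_maximo_por_distrito : PySem.Dict String String :=
    distritos_paises.items.foldl
      (fun acc pr =>
        acc.insert pr.1 ((PySem.List.max? pr.2.keys (fun p => pr.2.getD p 0)).getD ""))
      PySem.Dict.empty
  pais_maximo_por_distrito.items

-- ===== PORT B =====
def pais_mas_representado_por_distrito_alt (registros : List (String × String × String × String × Int × Int)) : List (String × String) :=
  let totales : PySem.Dict (String × String) Int :=
    registros.foldl
      (fun d r => d.insert (r.1, r.2.2.2.1) (d.getD (r.1, r.2.2.2.1) 0 + r.2.2.2.2.1 + r.2.2.2.2.2))
      PySem.Dict.empty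
  let mejor : PySem.Dict String String :=
    (PySem.List.sorted totales.items (fun kv => kv.2) true).foldl
      (fun m e => m.setdefault e.1.1 e.1.2) PySem.Dict.empty
  -- mejor[distrito]: the key is always present for a distrito of registros, so getD "" is exact here
  (registros.foldl (fun acc r => acc.insert r.1 (mejor.getD r.1 "")) PySem.Dict.empty).items

-- ===== PRECONDITION & SPEC =====
def Spec_pais_mas_representado_por_distrito (registros : List (String × String × String × String × Int × Int)) (out : List (String × String)) : Prop := out = pais_mas_representado_por_distrito_alt registros
instance (registros : List (String × String × String × String × Int × Int)) (out : List (String × String)) : Decidable (Spec_pais_mas_representado_por_distrito registros out) := by unfold Spec_pais_mas_representado_por_distrito; infer_instance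

-- ===== CLAIM (what is proved, stated in full; the proofs are below) =====
def Claim_equal_pais_mas_representado_por_distrito : Prop := ∀ (registros : List (String × String × String × String × Int × Int)), Dom_pais_mas_representado_por_distrito registros → Spec_pais_mas_representado_por_distrito registros (pais_mas_representado_por_distrito registros)

-- ===== LEMMAS AND PROOFS =====

abbrev pvReg : Type := String × String × String × String × Int × Int
def pvPais (r : pvReg) : String := r.2.2.2.1
def pvW (r : pvReg) : Int := r.2.2.2.2.1 + r.2.2.2.2.2
def pvKey2 (r : pvReg) : String × String := (r.1, pvPais r)
def pvStepInner (inner : PySem.Dict String Int) (r : pvReg) : PySem.Dict String Int :=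
  inner.modify (pvPais r) 0 (fun t => t + pvW r)

theorem pvA_localize (l : List pvReg) (dd : PySem.Dict String (PySem.Dict String Int)) (d : String) :
    (l.foldl
      (fun d r =>
        d.modify r.1 PySem.Dict.empty
          (fun inner => inner.modify r.2.2.2.1 0 (fun t => t + (r.2.2.2.2.1 + r.2.2.2.2.2))))
      dd).getD d PySem.Dict.empty
    = (l.filter (fun r => r.1 == d)).foldl pvStepInner (dd.getD d PySem.Dict.empty) := by
  induction l generalizing dd with
  | nil => simp
  | cons r l ih =>
      simp only [List.foldl_cons, ih, List.filter_cons]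
      by_cases h : r.1 = d
      · subst h
        simp [PySem.Dict.getD_modify, pvStepInner, pvPais, pvW]
      · have hne : (r.1 == d) = false := by simp [h]
        simp only [hne, Bool.false_eq_true, if_neg, PySem.Dict.getD_modify]
        rw [if_neg (fun hc => h hc.symm)]
        simp

theorem pvA_inner_sum (l : List pvReg) (inner : PySem.Dict String Int) (p : String) :
    (l.foldl pvStepInner inner).getD p 0 = inner.getD p 0 + ((l.filter (fun r => pvPais r == p)).map pvW).sum := by
  induction l generalizing inner with
  | nil => simp
  | cons r l ih =>
      simp only [List.foldl_cons, ih, List.filter_cons]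
      by_cases h : pvPais r = p
      · subst h
        simp [pvStepInner, PySem.Dict.getD_modify, add_assoc]
      · have hne : (pvPais r == p) = false := by simp [h]
        simp only [hne, Bool.false_eq_true, if_neg, pvStepInner, PySem.Dict.getD_modify]
        rw [if_neg (fun hc => h hc.symm)]
        simp

theorem pvB_flat_sum (l : List pvReg) (T : PySem.Dict (String × String) Int) (c : String × String) :
    (l.foldl
      (fun d r => d.insert (r.1, r.2.2.2.1) (d.getD (r.1, r.2.2.2.1) 0 + r.2.2.2.2.1 + r.2.2.2.2.2))
      T).getD c 0
    = T.getD c 0 + ((l.filter (fun r => pvKey2 r == c)).map pvW).sum := by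
  induction l generalizing T with
  | nil => simp
  | cons r l ih =>
      simp only [List.foldl_cons, ih, List.filter_cons]
      by_cases h : pvKey2 r = c
      · have hb : (pvKey2 r == c) = true := by simp [h]
        rw [hb]
        simp only [if_pos, PySem.Dict.getD_insert]
        rw [if_pos (by rw [← h]; rfl)]
        simp [pvW, add_assoc]
        exact congrArg (fun x => T.getD x 0) h
      · have hne : (pvKey2 r == c) = false := by simp [h]
        simp only [hne, Bool.false_eq_true, if_neg, PySem.Dict.getD_insert]
        rw [if_neg (fun hc => h (by rw [hc]; rfl))]
        simp

-- the strict ">" running-best step that PySem.List.max? folds with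
def pvStepMax {α : Type} (key : α → Int) (o : Option α) (x : α) : Option α :=
  match o with
  | none => some x
  | some m => if key m < key x then some x else some m

theorem pvInsertBy_pairwise {α : Type} (key : α → Int) (x : α) (ys : List α)
    (h : ys.Pairwise (fun a b => key b ≤ key a)) :
    (PySem.List.insertBy (fun a b => decide (key b < key a)) x ys).Pairwise (fun a b => key b ≤ key a) := by
  induction ys with
  | nil => simp [PySem.List.insertBy]
  | cons y ys ih =>
      rw [List.pairwise_cons] at h
      obtain ⟨hy, hys⟩ := h
      by_cases hlt : key y < key x
      · simp only [PySem.List.insertBy, hlt, decide_true, if_pos]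
        refine List.Pairwise.cons ?_ (List.Pairwise.cons hy hys)
        intro z hz
        rcases List.mem_cons.mp hz with hz | hz
        · exact le_of_lt (hz ▸ hlt)
        · exact le_trans (hy z hz) (le_of_lt hlt)
      · simp only [PySem.List.insertBy, hlt, decide_false, Bool.false_eq_true, if_neg]
        refine List.Pairwise.cons ?_ (ih hys)
        intro z hz
        rcases (PySem.List.mem_insertBy _ _ _ _).mp hz with hz | hz
        · exact hz ▸ le_of_not_gt hlt
        · exact hy z hz

theorem pvFind_insertBy_neg {α : Type} (bf : α → α → Bool) (p : α → Bool) (x : α) (ys : List α)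
    (hx : p x = false) :
    (PySem.List.insertBy bf x ys).find? p = ys.find? p := by
  induction ys with
  | nil => simp [PySem.List.insertBy, hx]
  | cons y ys ih =>
      by_cases hb : bf x y = true
      · simp [PySem.List.insertBy, hb, hx]
      · simp only [PySem.List.insertBy, hb, Bool.false_eq_true, if_neg]
        by_cases hy : p y = true
        · simp [List.find?_cons, hy]
        · simp [List.find?_cons, hy, ih]

theorem pvFind_insertBy_pos {α : Type} (key : α → Int) (p : α → Bool) (x : α) (ys : List α)
    (hx : p x = true) (h : ys.Pairwise (fun a b => key b ≤ key a)) :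
    (PySem.List.insertBy (fun a b => decide (key b < key a)) x ys).find? p
      = pvStepMax key (ys.find? p) x := by
  induction ys with
  | nil => simp [PySem.List.insertBy, hx, pvStepMax]
  | cons y ys ih =>
      rw [List.pairwise_cons] at h
      obtain ⟨hy, hys⟩ := h
      by_cases hlt : key y < key x
      · simp only [PySem.List.insertBy, hlt, decide_true, if_pos]
        rw [List.find?_cons_of_pos hx]
        cases hf : (y :: ys).find? p with
        | none => rfl
        | some m =>
            have hm : m ∈ y :: ys := List.mem_of_find?_eq_some hf
            have hmle : key m ≤ key y := by
              rcases List.mem_cons.mp hm with hm | hm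
              · exact le_of_eq (congrArg key hm)
              · exact hy m hm
            simp [pvStepMax, lt_of_le_of_lt hmle hlt]
      · simp only [PySem.List.insertBy, hlt, decide_false, Bool.false_eq_true, if_false]
        by_cases hpy : p y = true
        · rw [List.find?_cons_of_pos hpy, List.find?_cons_of_pos hpy]
          simp [pvStepMax, hlt]
        · rw [List.find?_cons_of_neg (by simp [hpy]), List.find?_cons_of_neg (by simp [hpy])]
          exact ih hys

theorem pvFoldl_insertBy_find {α : Type} (key : α → Int) (p : α → Bool) (L : List α)
    (acc : List α) (h : acc.Pairwise (fun a b => key b ≤ key a)) :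
    ((L.foldl (fun acc x => PySem.List.insertBy (fun a b => decide (key b < key a)) x acc) acc).find? p)
      = (L.filter p).foldl (pvStepMax key) (acc.find? p) := by
  induction L generalizing acc with
  | nil => rfl
  | cons x L ih =>
      simp only [List.foldl_cons, List.filter_cons]
      have hacc' := pvInsertBy_pairwise key x acc h
      by_cases hx : p x = true
      · rw [if_pos hx, List.foldl_cons, ih _ hacc', pvFind_insertBy_pos key p x acc hx h]
      · rw [if_neg (by simp [hx]), ih _ hacc',
          pvFind_insertBy_neg (fun a b => decide (key b < key a)) p x acc (by simpa using hx)]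

theorem pvFind_sorted {α : Type} (key : α → Int) (p : α → Bool) (L : List α) :
    (PySem.List.sorted L key true).find? p = PySem.List.max? (L.filter p) key := by
  rw [PySem.List.sorted_rev_eq_foldl_insertBy, pvFoldl_insertBy_find key p L [] (by simp)]
  show _ = (L.filter p).foldl _ none
  congr 1

theorem pvSd_run (S : List ((String × String) × Int)) (m : PySem.Dict String String) (d : String) :
    (S.foldl (fun m e => m.setdefault e.1.1 e.1.2) m).get? d
      = (m.get? d).or ((S.find? (fun e => e.1.1 == d)).map (fun e => e.1.2)) := by
  induction S generalizing m with
  | nil => simp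
  | cons e S ih =>
      simp only [List.foldl_cons, ih]
      by_cases hd : e.1.1 = d
      · rw [List.find?_cons_of_pos (by simp [hd])]
        cases hm : m.get? d with
        | some v =>
            rw [← hd] at hm
            rw [hd] at hm ⊢
            rw [PySem.Dict.get?_setdefault_self, hm]
            rfl
        | none =>
            rw [← hd] at hm
            rw [hd] at hm ⊢
            rw [PySem.Dict.get?_setdefault_self, hm]
            rfl
      · rw [List.find?_cons_of_neg (by simp [hd]),
          PySem.Dict.get?_setdefault_of_ne _ _ (fun hc => hd hc.symm)]

theorem pvMax_map {α β : Type} (g : β → α) (key : α → Int) (l : List β) (acc : Option β) :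
    ((l.map g).foldl (pvStepMax key) (acc.map g))
      = (l.foldl (pvStepMax (fun b => key (g b))) acc).map g := by
  induction l generalizing acc with
  | nil => rfl
  | cons x l ih =>
      cases acc with
      | none => exact ih (some x)
      | some m =>
          simp only [List.map_cons, List.foldl_cons, Option.map_some, pvStepMax]
          by_cases h : key (g m) < key (g x)
          · rw [if_pos h, if_pos h, show (some (g x)) = (some x).map g from rfl, ih]
          · rw [if_neg h, if_neg h, show (some (g m)) = (some m).map g from rfl, ih]

theorem pvMax?_map {α β : Type} (g : β → α) (key : α → Int) (l : List β) :
    PySem.List.max? (l.map g) key = (PySem.List.max? l (fun b => key (g b))).map g := by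
  have h := pvMax_map g key l none
  simp only [Option.map_none] at h
  have hl : PySem.List.max? (l.map g) key = (l.map g).foldl (pvStepMax key) none := by
    unfold PySem.List.max?
    congr 1
  have hr : PySem.List.max? l (fun b => key (g b)) = l.foldl (pvStepMax (fun b => key (g b))) none := by
    unfold PySem.List.max?
    congr 1
  rw [hl, hr, h]

theorem pvIns_run (g : String → String) (R : List pvReg) (acc : PySem.Dict String String) (d : String) :
    (R.foldl (fun acc r => acc.insert r.1 (g r.1)) acc).getD d ""
      = if d ∈ R.map (fun r => r.1) then g d else acc.getD d "" := by
  induction R generalizing acc with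
  | nil => simp
  | cons r R ih =>
      simp only [List.foldl_cons, ih, List.map_cons, List.mem_cons]
      by_cases hR : d ∈ R.map (fun r => r.1)
      · simp [hR]
      · by_cases hd : d = r.1
        · simp [hR, hd, PySem.Dict.getD_insert]
        · simp [hR, hd, PySem.Dict.getD_insert]

theorem pvSet_add_filter {α : Type} [BEq α] [LawfulBEq α] (p : α → Bool) (s : PySem.Set α) (x : α) :
    (PySem.Set.add s x).filter p = if p x then PySem.Set.add (s.filter p) x else s.filter p := by
  by_cases hx : x ∈ s
  · have : p x = true → x ∈ s.filter p := fun hp => List.mem_filter.mpr ⟨hx, hp⟩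
    by_cases hp : p x = true <;> simp [PySem.Set.add, hx, hp, this]
  · have hxf : x ∉ s.filter p := fun hc => hx (List.mem_filter.mp hc).1
    by_cases hp : p x = true <;> simp [PySem.Set.add, hx, hxf, hp, List.filter_append]

theorem pvSet_update_filter {α : Type} [BEq α] [LawfulBEq α] (p : α → Bool) (l : List α) (s : PySem.Set α) :
    (PySem.Set.update s l).filter p = PySem.Set.update (s.filter p) (l.filter p) := by
  induction l generalizing s with
  | nil => simp [PySem.Set.update]
  | cons x l ih =>
      rw [PySem.Set.update_cons, ih, pvSet_add_filter]
      by_cases hp : p x = true <;> simp [hp, PySem.Set.update_cons]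

theorem pvSet_add_map_inj {α β : Type} [BEq α] [LawfulBEq α] [BEq β] [LawfulBEq β] (f : α → β)
    (hf : Function.Injective f) (s : PySem.Set α) (x : α) :
    PySem.Set.add (s.map f) (f x) = (PySem.Set.add s x).map f := by
  by_cases hx : x ∈ s
  · simp [PySem.Set.add, hx, List.mem_map_of_mem hx]
  · have : f x ∉ s.map f := by
      intro hc; obtain ⟨y, hy, he⟩ := List.mem_map.mp hc; exact hx (hf he ▸ hy)
    simp [PySem.Set.add, hx, this]

theorem pvSet_map_inj {α β : Type} [BEq α] [LawfulBEq α] [BEq β] [LawfulBEq β] (f : α → β)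
    (hf : Function.Injective f) (l : List α) (s : PySem.Set α) :
    PySem.Set.update (s.map f) (l.map f) = (PySem.Set.update s l).map f := by
  induction l generalizing s with
  | nil => simp [PySem.Set.update]
  | cons x l ih =>
      rw [List.map_cons, PySem.Set.update_cons, PySem.Set.update_cons, pvSet_add_map_inj f hf, ih]

theorem pvSet_ofList_filter {α : Type} [BEq α] [LawfulBEq α] (p : α → Bool) (l : List α) :
    (PySem.Set.ofList l).filter p = PySem.Set.ofList (l.filter p) := by
  rw [← PySem.Set.update_empty l, pvSet_update_filter, ← PySem.Set.update_empty (l.filter p)]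
  rfl

theorem pvSet_ofList_map_inj {α β : Type} [BEq α] [LawfulBEq α] [BEq β] [LawfulBEq β] (f : α → β)
    (hf : Function.Injective f) (l : List α) :
    PySem.Set.ofList (l.map f) = (PySem.Set.ofList l).map f := by
  rw [← PySem.Set.update_empty l, ← pvSet_map_inj f hf, ← PySem.Set.update_empty (l.map f)]
  rfl

def pvTot (registros : List pvReg) (d p : String) : Int :=
  (((registros.filter (fun r => r.1 == d)).filter (fun r => pvPais r == p)).map pvW).sum

def pvPs (registros : List pvReg) (d : String) : List String :=
  PySem.Set.ofList ((registros.filter (fun r => r.1 == d)).map pvPais)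

def pvDs (registros : List pvReg) : List String :=
  PySem.Set.ofList (registros.map (fun r => r.1))

def pvChoice (inner : PySem.Dict String Int) : String :=
  (PySem.List.max? inner.keys (fun p => inner.getD p 0)).getD ""

def pvStepR (acc : PySem.Dict String String) (pr : String × PySem.Dict String Int) :
    PySem.Dict String String :=
  acc.insert pr.1 (pvChoice pr.2)

theorem pvPortA_eq (R : List pvReg) :
    pais_mas_representado_por_distrito R
    = ((R.foldl
        (fun d r =>
          d.modify r.1 PySem.Dict.empty
            (fun inner => inner.modify r.2.2.2.1 0 (fun t => t + (r.2.2.2.2.1 + r.2.2.2.2.2))))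
        PySem.Dict.empty).items.foldl pvStepR PySem.Dict.empty).items := rfl

theorem pvInner_keys (l : List pvReg) :
    (l.foldl pvStepInner PySem.Dict.empty).keys = PySem.Set.ofList (l.map pvPais) := by
  have h := PySem.Dict.keys_foldl_modify_key l pvPais 0
    (fun _ r => fun t => t + pvW r) PySem.Dict.empty
  have hb : l.foldl pvStepInner PySem.Dict.empty
      = l.foldl (fun d x => d.modify (pvPais x) 0 ((fun _ r => fun t => t + pvW r) d x))
          PySem.Dict.empty := rfl
  rw [hb, h]
  rfl

theorem pvDp_keys (R : List pvReg) :
    (R.foldl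
      (fun d r =>
        d.modify r.1 PySem.Dict.empty
          (fun inner => inner.modify r.2.2.2.1 0 (fun t => t + (r.2.2.2.2.1 + r.2.2.2.2.2))))
      PySem.Dict.empty).keys = pvDs R := by
  have h := PySem.Dict.keys_foldl_modify_key R (fun r : pvReg => r.1)
    (PySem.Dict.empty : PySem.Dict String Int)
    (fun _ r => fun inner => inner.modify r.2.2.2.1 0 (fun t => t + (r.2.2.2.2.1 + r.2.2.2.2.2)))
    PySem.Dict.empty
  rw [h]
  rfl

theorem pvT_keys (R : List pvReg) :
    (R.foldl
      (fun d r => d.insert (r.1, r.2.2.2.1) (d.getD (r.1, r.2.2.2.1) 0 + r.2.2.2.2.1 + r.2.2.2.2.2))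
      PySem.Dict.empty).keys = PySem.Set.ofList (R.map pvKey2) := by
  have h := PySem.Dict.keys_foldl_insert_key R pvKey2
    (fun d r => d.getD (pvKey2 r) 0 + r.2.2.2.2.1 + r.2.2.2.2.2) PySem.Dict.empty
  have hb : R.foldl
      (fun d r => d.insert (r.1, r.2.2.2.1) (d.getD (r.1, r.2.2.2.1) 0 + r.2.2.2.2.1 + r.2.2.2.2.2))
      PySem.Dict.empty
      = R.foldl (fun d r => d.insert (pvKey2 r) (d.getD (pvKey2 r) 0 + r.2.2.2.2.1 + r.2.2.2.2.2))
          PySem.Dict.empty := rfl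
  rw [hb, h]
  rfl

theorem pvTot2_eq (R : List pvReg) (d p : String) :
    ((R.filter (fun r => pvKey2 r == (d, p))).map pvW).sum = pvTot R d p := by
  rw [pvTot, List.filter_filter]
  have hpt : ∀ r : pvReg, (pvKey2 r == (d, p)) = (pvPais r == p && r.1 == d) := by
    intro r
    rw [pvKey2, Bool.eq_iff_iff]
    by_cases h1 : r.1 = d <;> by_cases h2 : pvPais r = p <;> simp [h1, h2]
  rw [List.filter_congr (fun r _ => hpt r)]

theorem pvA_char (R : List pvReg) :
    pais_mas_representado_por_distrito R
    = (pvDs R).map (fun d => (d, (PySem.List.max? (pvPs R d) (fun p => pvTot R d p)).getD "")) := by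
  rw [pvPortA_eq]
  set dp := R.foldl
      (fun d r =>
        d.modify r.1 PySem.Dict.empty
          (fun inner => inner.modify r.2.2.2.1 0 (fun t => t + (r.2.2.2.2.1 + r.2.2.2.2.2))))
      PySem.Dict.empty with hdp
  have hkeys : dp.keys = pvDs R := pvDp_keys R
  have hnodup : dp.keys.Nodup := by
    rw [hkeys, pvDs]; exact PySem.Set.nodup_ofList _
  have hfresh : ∀ a ∈ dp.items, (PySem.Dict.empty : PySem.Dict String String).contains a.1 = false := by
    intro a _; exact PySem.Dict.contains_empty a.1
  have hmapnodup : (dp.items.map (fun pr : String × PySem.Dict String Int => pr.1)).Nodup := hnodup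
  have hif := PySem.Dict.items_foldl_insert_fresh dp.items
    (fun pr : String × PySem.Dict String Int => pr.1) (fun pr => pvChoice pr.2)
    PySem.Dict.empty hfresh hmapnodup
  have hb : dp.items.foldl pvStepR PySem.Dict.empty
      = dp.items.foldl
          (fun dAcc a =>
            dAcc.insert ((fun pr : String × PySem.Dict String Int => pr.1) a)
              ((fun pr : String × PySem.Dict String Int => pvChoice pr.2) a))
          PySem.Dict.empty := rfl
  rw [hb, hif]
  have hitems := PySem.Dict.items_eq_map_keys dp hnodup PySem.Dict.empty
  rw [hitems, List.map_map]
  simp only [List.nil_append]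
  rw [hkeys]
  apply List.map_congr_left
  intro d _
  have hloc := pvA_localize R PySem.Dict.empty d
  have hF : dp.getD d PySem.Dict.empty
      = (R.filter (fun r => r.1 == d)).foldl pvStepInner PySem.Dict.empty := by
    rw [hdp, hloc]
    rfl
  have hFkeys := pvInner_keys (R.filter (fun r => r.1 == d))
  have hFget : (fun p => ((R.filter (fun r => r.1 == d)).foldl pvStepInner PySem.Dict.empty).getD p 0)
      = fun p => pvTot R d p := by
    funext p
    rw [pvA_inner_sum]
    simp only [PySem.Dict.getD_empty, zero_add]
    rfl
  simp only [Function.comp]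
  rw [hF, pvChoice, hFkeys, hFget]
  rfl

theorem pvB_char (R : List pvReg) :
    pais_mas_representado_por_distrito_alt R
    = (pvDs R).map (fun d => (d, (PySem.List.max? (pvPs R d) (fun p => pvTot R d p)).getD "")) := by
  unfold pais_mas_representado_por_distrito_alt
  set T := R.foldl
      (fun d r => d.insert (r.1, r.2.2.2.1) (d.getD (r.1, r.2.2.2.1) 0 + r.2.2.2.2.1 + r.2.2.2.2.2))
      PySem.Dict.empty with hT
  set mejor := (PySem.List.sorted T.items (fun kv => kv.2) true).foldl
      (fun m e => m.setdefault e.1.1 e.1.2) PySem.Dict.empty with hmejor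
  have hTkeys : T.keys = PySem.Set.ofList (R.map pvKey2) := pvT_keys R
  have hTnodup : T.keys.Nodup := by
    rw [hTkeys]; exact PySem.Set.nodup_ofList _
  have hTget : ∀ c, T.getD c 0 = ((R.filter (fun r => pvKey2 r == c)).map pvW).sum := by
    intro c
    rw [hT, pvB_flat_sum]
    simp [PySem.Dict.getD_empty]
  have hL : T.items = (PySem.Set.ofList (R.map pvKey2)).map
      (fun c => (c, ((R.filter (fun r => pvKey2 r == c)).map pvW).sum)) := by
    rw [PySem.Dict.items_eq_map_keys T hTnodup 0, hTkeys]
    apply List.map_congr_left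
    intro c _
    rw [hTget c]
  have hmget : ∀ d, mejor.get? d = PySem.List.max? (pvPs R d) (fun p => pvTot R d p) := by
    intro d
    have hsd := pvSd_run (PySem.List.sorted T.items (fun kv => kv.2) true) PySem.Dict.empty d
    rw [hmejor, hsd, PySem.Dict.get?_empty, Option.none_or,
      pvFind_sorted (fun kv => kv.2) (fun e => e.1.1 == d) T.items]
    have hproj : T.items.filter (fun e => e.1.1 == d)
        = (pvPs R d).map (fun p => ((d, p), pvTot R d p)) := by
      rw [hL, List.filter_map]
      have hpf : ((fun e : (String × String) × Int => e.1.1 == d) ∘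
          (fun c : String × String => (c, ((R.filter (fun r => pvKey2 r == c)).map pvW).sum)))
          = fun c : String × String => c.1 == d := rfl
      rw [hpf, pvSet_ofList_filter, List.filter_map]
      have hqf : ((fun c : String × String => c.1 == d) ∘ pvKey2) = fun r : pvReg => r.1 == d := rfl
      rw [hqf]
      have hmapk : (R.filter (fun r => r.1 == d)).map pvKey2
          = ((R.filter (fun r => r.1 == d)).map pvPais).map (fun p => ((d, p) : String × String)) := by
        rw [List.map_map]
        apply List.map_congr_left
        intro r hr
        have hrd : r.1 = d := by
          have := (List.mem_filter.mp hr).2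
          simpa using this
        simp [pvKey2, Function.comp, hrd]
      rw [hmapk, pvSet_ofList_map_inj (fun p => ((d, p) : String × String))
        (fun a b h => by simpa using h), List.map_map]
      apply List.map_congr_left
      intro p _
      have := pvTot2_eq R d p
      simp only [Function.comp]
      rw [this]
    rw [hproj, pvMax?_map (fun p => ((d, p), pvTot R d p)) (fun e => e.2) (pvPs R d)]
    have hkey : (fun b => ((fun e : (String × String) × Int => e.2)
        ((fun p => ((d, p), pvTot R d p)) b))) = fun p => pvTot R d p := rfl
    rw [hkey, Option.map_map]
    have hcomp : ((fun e : (String × String) × Int => e.1.2) ∘ (fun p => ((d, p), pvTot R d p)))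
        = id := rfl
    rw [hcomp, Option.map_id]
    rfl
  have hkeys : (R.foldl (fun acc r => acc.insert r.1 (mejor.getD r.1 "")) PySem.Dict.empty).keys
      = pvDs R := by
    have h := PySem.Dict.keys_foldl_insert_key R (fun r : pvReg => r.1)
      (fun _ r => mejor.getD r.1 "") PySem.Dict.empty
    have hup : PySem.Set.update (PySem.Dict.empty : PySem.Dict String String).keys
        (R.map (fun r : pvReg => r.1)) = PySem.Set.ofList (R.map (fun r : pvReg => r.1)) :=
      PySem.Set.update_empty _
    rw [h, hup]
    rfl
  have hnodup : (R.foldl (fun acc r => acc.insert r.1 (mejor.getD r.1 "")) PySem.Dict.empty).keys.Nodup := by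
    rw [hkeys, pvDs]; exact PySem.Set.nodup_ofList _
  rw [PySem.Dict.items_eq_map_keys _ hnodup "", hkeys]
  apply List.map_congr_left
  intro d hd
  have hmem : d ∈ R.map (fun r : pvReg => r.1) := by
    rw [pvDs, PySem.Set.mem_ofList] at hd
    exact hd
  have hrun := pvIns_run (fun s => mejor.getD s "") R PySem.Dict.empty d
  rw [if_pos hmem] at hrun
  rw [hrun, PySem.Dict.getD_eq_get?_getD, hmget d]

-- ===== VERDICT (by name: the statement is the Claim_ definition above) =====
theorem pais_mas_representado_por_distrito_spec : Claim_equal_pais_mas_representado_por_distrito := by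
  intro registros _
  unfold Spec_pais_mas_representado_por_distrito
  rw [pvA_char, pvB_char]
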